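-- pv_equiv track=rewrite | github.com/Encapsia/encapsia-cli | encapsia_cli/plugininfo.py | get_variant_from_tags
-- ===== SOURCE A (Python) =====
-- class TooManyVariantTagsError(Exception):
--
--     pass
--
-- def get_variant_from_tags(tags):
--     variant_tags = [t for t in tags if t.startswith("variant=")]
--     if len(variant_tags) == 0:
--         variant = None
--     elif len(variant_tags) == 1:
--         variant = variant_tags[0].split("=", 1)[1]
--     else:
--         raise TooManyVariantTagsError("Found more than one variant tags.")
--     return variant
-- ===== SOURCE B (Python) =====
-- class TooManyVariantTagsError(Exception):
--     pass
--
-- def get_variant_from_tags(tags):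
--     variant = None
--     found = False
--     for t in tags:
--         if t.startswith("variant="):
--             if found:
--                 raise TooManyVariantTagsError("Found more than one variant tags.")
--             variant = t.split("=", 1)[1]
--             found = True
--     return variant
-- ===== Notes on version B (the rewrite author's own statement) =====
-- stated objective: alternative
-- what changed: Replaced collect-all-matches-then-branch-on-count with a single pass carrying an accumulator and a found flag that raises immediately on the second variant tag, never materializing the filtered list.
import Mathlib
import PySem

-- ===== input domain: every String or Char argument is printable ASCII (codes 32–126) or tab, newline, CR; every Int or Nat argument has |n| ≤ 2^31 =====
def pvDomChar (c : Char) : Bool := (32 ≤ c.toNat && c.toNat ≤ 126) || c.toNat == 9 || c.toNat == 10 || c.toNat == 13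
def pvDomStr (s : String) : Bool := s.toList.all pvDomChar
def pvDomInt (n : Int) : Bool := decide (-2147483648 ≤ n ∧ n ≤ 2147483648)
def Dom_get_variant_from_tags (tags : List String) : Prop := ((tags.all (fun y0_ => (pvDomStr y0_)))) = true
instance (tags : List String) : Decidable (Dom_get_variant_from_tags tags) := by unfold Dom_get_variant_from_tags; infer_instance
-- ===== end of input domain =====

-- ===== PORT A =====
-- B replaces collect-then-branch with a single accumulator pass (same exception on a
-- second variant tag; those inputs are excluded by Pre_).
def get_variant_from_tags (tags : List String) : Option String :=
  let variant_tags := tags.filter (fun t => PySem.Str.startswith t "variant=")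
  if variant_tags.length = 0 then none
  else if variant_tags.length = 1 then
    -- variant_tags[0].split("=", 1)[1]; both indexings are in range under Pre_
    (PySem.List.pyGet? variant_tags 0).bind
      (fun t => PySem.List.pyGet? ((PySem.Str.splitMax? t "=" 1).getD []) 1)
  else none  -- raise TooManyVariantTagsError: excluded by Pre_

-- ===== PORT B =====
-- loop over tags with accumulator `variant` and flag `found`
def get_variant_from_tags_altGo (tags : List String) (variant : Option String) (found : Bool) : Option String :=
  match tags with
  | [] => variant
  | t :: rest =>
    if PySem.Str.startswith t "variant=" then
      if found then none  -- raise TooManyVariantTagsError: excluded by Pre_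
      else get_variant_from_tags_altGo rest
        (PySem.List.pyGet? ((PySem.Str.splitMax? t "=" 1).getD []) 1) true
    else get_variant_from_tags_altGo rest variant found

def get_variant_from_tags_alt (tags : List String) : Option String :=
  get_variant_from_tags_altGo tags none false

-- ===== PRECONDITION & SPEC =====
-- Pre_ excludes exactly the inputs with two or more "variant=" tags, on which both A and B
-- raise TooManyVariantTagsError.
def Pre_get_variant_from_tags (tags : List String) : Prop :=
  tags.countP (fun t => PySem.Str.startswith t "variant=") ≤ 1
instance (tags : List String) : Decidable (Pre_get_variant_from_tags tags) := by
  unfold Pre_get_variant_from_tags; infer_instance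
def pvWitness_get_variant_from_tags : List String := ["variant=foo", "bar"]
def Spec_get_variant_from_tags (tags : List String) (out : Option String) : Prop := out = get_variant_from_tags_alt tags
instance (tags : List String) (out : Option String) : Decidable (Spec_get_variant_from_tags tags out) := by unfold Spec_get_variant_from_tags; infer_instance

-- ===== CLAIM (what is proved, stated in full; the proofs are below) =====
def Claim_equal_get_variant_from_tags : Prop := ∀ (tags : List String), Dom_get_variant_from_tags tags → Pre_get_variant_from_tags tags → Spec_get_variant_from_tags tags (get_variant_from_tags tags)

-- ===== LEMMAS AND PROOFS =====
theorem altGo_no_match (tags : List String)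
    (h : tags.countP (fun t => PySem.Str.startswith t "variant=") = 0)
    (v : Option String) (b : Bool) :
    get_variant_from_tags_altGo tags v b = v := by
  induction tags generalizing v b with
  | nil => rfl
  | cons t rest ih =>
    rw [List.countP_cons] at h
    cases hps : PySem.Str.startswith t "variant=" with
    | true => simp only [hps, if_true] at h; omega
    | false =>
      have hr : rest.countP (fun t => PySem.Str.startswith t "variant=") = 0 := by
        simp only [hps, Bool.false_eq_true, if_false] at h; omega
      simp only [get_variant_from_tags_altGo, hps, Bool.false_eq_true, if_false]
      exact ih hr v b

theorem main_equiv (tags : List String)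
    (hpre : tags.countP (fun t => PySem.Str.startswith t "variant=") ≤ 1) :
    get_variant_from_tags tags = get_variant_from_tags_altGo tags none false := by
  induction tags with
  | nil => rfl
  | cons t rest ih =>
    rw [List.countP_cons] at hpre
    cases hp : PySem.Str.startswith t "variant=" with
    | true =>
      have hr : rest.countP (fun t => PySem.Str.startswith t "variant=") = 0 := by
        simp only [hp, if_true] at hpre; omega
      have hfil : rest.filter (fun t => PySem.Str.startswith t "variant=") = [] :=
        List.filter_eq_nil_iff.mpr (by
          intro x hx
          have := List.countP_eq_zero.mp hr x hx
          simpa using this)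
      have hcons : (t :: rest).filter (fun t => PySem.Str.startswith t "variant=") = [t] := by
        simp only [List.filter_cons, hp, if_true, hfil]
      simp only [get_variant_from_tags, get_variant_from_tags_altGo, hp, if_true,
        hcons, altGo_no_match rest hr]
      simp [PySem.List.pyGet?, PySem.List.pyIdx?]
    | false =>
      have hpre' : rest.countP (fun t => PySem.Str.startswith t "variant=") ≤ 1 := by
        simp only [hp, Bool.false_eq_true, if_false] at hpre; omega
      have hcons : (t :: rest).filter (fun t => PySem.Str.startswith t "variant=")
          = rest.filter (fun t => PySem.Str.startswith t "variant=") := by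
        simp only [List.filter_cons, hp, Bool.false_eq_true, if_false]
      simp only [get_variant_from_tags, get_variant_from_tags_altGo, hp,
        Bool.false_eq_true, if_false, hcons]
      exact ih hpre'

-- ===== VERDICT (by name: the statement is the Claim_ definition above) =====
theorem get_variant_from_tags_spec : Claim_equal_get_variant_from_tags := by
  intro tags _ hpre
  unfold Spec_get_variant_from_tags get_variant_from_tags_alt
  exact main_equiv tags hpre
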